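-- pv_equiv track=rewrite | github.com/ssrajput100/ccc | p1.py | min_balls_to_buy
-- ===== SOURCE A (Python) =====
-- def min_balls_to_buy(N, arr):
--     if N == 0:
--         return 0
--
--     # Initialize an array to store the number of balls for each child
--     balls = [1] * N
--
--     # Traverse the array from left to right, updating the number of balls
--     for i in range(1, N):
--         if arr[i] > arr[i - 1]:
--             balls[i] = balls[i - 1] + 1
--
--     # Traverse the array from right to left, updating the number of balls
--     for i in range(N - 2, -1, -1):
--         if arr[i] > arr[i + 1] and balls[i] <= balls[i + 1]:
--             balls[i] = balls[i + 1] + 1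
--
--     # Calculate the total number of balls needed
--     total_balls = sum(balls)
--     return total_balls
-- ===== SOURCE B (Python) =====
-- def min_balls_to_buy(N, arr):
--     # single forward pass with O(1) state: no balls array, no backward pass
--     if N <= 0:
--         return 0
--     up = down = peak = 0
--     total = 1
--     for i in range(1, N):
--         if arr[i] > arr[i - 1]:
--             up += 1
--             down = 0
--             peak = up
--             total += 1 + up
--         elif arr[i] == arr[i - 1]:
--             up = down = peak = 0
--             total += 1
--         else:
--             up = 0
--             down += 1
--             total += 1 + down
--             if peak >= down:
--                 total -= 1
--     return total
-- ===== Notes on version B (the rewrite author's own statement) =====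
-- stated objective: alternative
-- what changed: Replaces A's balls array with its forward pass, backward fix-up pass and final sum by a single forward scan that keeps only four integer counters (up, down, peak, total), adding each child's candies on the fly and correcting the running total by the peak-vs-descent comparison instead of revisiting earlier positions.
import Mathlib
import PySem

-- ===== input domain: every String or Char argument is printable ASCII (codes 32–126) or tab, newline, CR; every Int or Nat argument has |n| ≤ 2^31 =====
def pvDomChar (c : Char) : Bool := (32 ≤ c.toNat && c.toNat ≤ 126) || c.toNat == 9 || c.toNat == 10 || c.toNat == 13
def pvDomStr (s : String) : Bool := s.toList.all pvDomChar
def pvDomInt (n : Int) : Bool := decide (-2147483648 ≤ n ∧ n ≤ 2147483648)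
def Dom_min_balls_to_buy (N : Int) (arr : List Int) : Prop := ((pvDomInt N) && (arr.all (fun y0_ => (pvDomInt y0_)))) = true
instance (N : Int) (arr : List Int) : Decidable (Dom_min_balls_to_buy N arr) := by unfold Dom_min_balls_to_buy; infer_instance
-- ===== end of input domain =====

-- B replaces A's balls array with its forward pass and backward fix-up pass by a single forward
-- scan keeping only four integer counters (up, down, peak, total); equivalence of the return values is proved on Pre_.

-- ===== PORT A =====
-- loop bodies of A's two for-loops, named so the proofs can refer to them
def pvStep1 (arr : List Int) (b : List Int) (i : Int) : List Int :=
  if PySem.List.pyGetD arr i 0 > PySem.List.pyGetD arr (i - 1) 0 then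
    PySem.List.pySetD b i (PySem.List.pyGetD b (i - 1) 0 + 1)
  else b

def pvStep2 (arr : List Int) (b : List Int) (i : Int) : List Int :=
  if PySem.List.pyGetD arr i 0 > PySem.List.pyGetD arr (i + 1) 0 ∧
     PySem.List.pyGetD b i 0 ≤ PySem.List.pyGetD b (i + 1) 0 then
    PySem.List.pySetD b i (PySem.List.pyGetD b (i + 1) 0 + 1)
  else b

def min_balls_to_buy (N : Int) (arr : List Int) : Int :=
  if N = 0 then 0
  else
    let balls0 := List.replicate N.toNat (1 : Int)
    let balls1 := (PySem.List.pyRange 1 N 1).foldl (pvStep1 arr) balls0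
    let balls2 := (PySem.List.pyRange (N - 2) (-1) (-1)).foldl (pvStep2 arr) balls1
    balls2.sum

-- ===== PORT B =====
-- Source B's loop body: state (up, down, peak, total), one step per index i
def pvStepB (arr : List Int) (st : Int × Int × Int × Int) (i : Int) : Int × Int × Int × Int :=
  if PySem.List.pyGetD arr i 0 > PySem.List.pyGetD arr (i - 1) 0 then
    (st.1 + 1, 0, st.1 + 1, st.2.2.2 + 1 + (st.1 + 1))
  else if PySem.List.pyGetD arr i 0 = PySem.List.pyGetD arr (i - 1) 0 then
    (0, 0, 0, st.2.2.2 + 1)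
  else
    (0, st.2.1 + 1, st.2.2.1,
      st.2.2.2 + 1 + (st.2.1 + 1) - (if st.2.2.1 ≥ st.2.1 + 1 then 1 else 0))

def min_balls_to_buy_alt (N : Int) (arr : List Int) : Int :=
  if N ≤ 0 then 0
  else ((PySem.List.pyRange 1 N 1).foldl (pvStepB arr) (0, 0, 0, 1)).2.2.2

-- ===== PRECONDITION & SPEC =====
-- Pre_ excludes only inputs on which A raises: for N ≥ 2 with N greater than the list's
-- length, arr[i] raises IndexError (and B's arr[i] raises there too).
def Pre_min_balls_to_buy (N : Int) (arr : List Int) : Prop :=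
  N ≤ (arr.length : Int) ∨ N ≤ 1
instance (N : Int) (arr : List Int) : Decidable (Pre_min_balls_to_buy N arr) := by
  unfold Pre_min_balls_to_buy; infer_instance

def pvWitness_min_balls_to_buy : Int × List Int := (3, [2, 1, 2])

def Spec_min_balls_to_buy (N : Int) (arr : List Int) (out : Int) : Prop := out = min_balls_to_buy_alt N arr
instance (N : Int) (arr : List Int) (out : Int) : Decidable (Spec_min_balls_to_buy N arr out) := by unfold Spec_min_balls_to_buy; infer_instance

-- ===== CLAIM (what is proved, stated in full; the proofs are below) =====
def Claim_equal_min_balls_to_buy : Prop := ∀ (N : Int) (arr : List Int), Dom_min_balls_to_buy N arr → Pre_min_balls_to_buy N arr → Spec_min_balls_to_buy N arr (min_balls_to_buy N arr)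

-- ===== LEMMAS AND PROOFS =====

-- specification lists: increasing-run lengths ending at each index (pvUps),
-- decreasing-run lengths starting at each index (pvDowns), and their pointwise max (pvM)
def pvUpsA : Int → Int → List Int → List Int
  | _, _, [] => []
  | p, r, x :: xs => (if p < x then r + 1 else 1) :: pvUpsA x (if p < x then r + 1 else 1) xs

def pvUps : List Int → List Int
  | [] => []
  | x :: xs => 1 :: pvUpsA x 1 xs

def pvDowns (a : List Int) : List Int := (pvUps a.reverse).reverse
def pvM (a : List Int) : List Int := List.zipWith max (pvUps a) (pvDowns a)

lemma length_pvUpsA (xs : List Int) : ∀ (p r : Int), (pvUpsA p r xs).length = xs.length := by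
  induction xs with
  | nil => intro p r; rfl
  | cons x t ih => intro p r; simp [pvUpsA, ih]

lemma length_pvUps (a : List Int) : (pvUps a).length = a.length := by
  cases a <;> simp [pvUps, length_pvUpsA]

lemma length_pvDowns (a : List Int) : (pvDowns a).length = a.length := by
  simp [pvDowns, length_pvUps]

lemma length_pvM (a : List Int) : (pvM a).length = a.length := by
  simp [pvM, length_pvUps, length_pvDowns]

lemma pvUpsA_pos (xs : List Int) : ∀ (p r : Int), 0 ≤ r → ∀ v ∈ pvUpsA p r xs, 1 ≤ v := by
  induction xs with
  | nil => intro p r _ v hv; simp [pvUpsA] at hv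
  | cons x t ih =>
    intro p r hr v hv
    simp only [pvUpsA, List.mem_cons] at hv
    rcases hv with h | h
    · subst h; by_cases hc : p < x <;> simp [hc] <;> omega
    · exact ih x _ (by by_cases hc : p < x <;> simp [hc] <;> omega) v h

lemma pvUps_pos (a : List Int) : ∀ v ∈ pvUps a, 1 ≤ v := by
  cases a with
  | nil => intro v hv; simp [pvUps] at hv
  | cons x t =>
    intro v hv
    simp only [pvUps, List.mem_cons] at hv
    rcases hv with h | h
    · omega
    · exact pvUpsA_pos t x 1 (by omega) v h

lemma pvUps_getD_pos (a : List Int) (j : Nat) (hj : j < a.length) : 1 ≤ (pvUps a).getD j 0 := by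
  rw [List.getD_eq_getElem (pvUps a) 0 (by rw [length_pvUps]; exact hj)]
  exact pvUps_pos a _ (List.getElem_mem _)

lemma pvDowns_getD_pos (a : List Int) (j : Nat) (hj : j < a.length) : 1 ≤ (pvDowns a).getD j 0 := by
  rw [List.getD_eq_getElem (pvDowns a) 0 (by rw [length_pvDowns]; exact hj)]
  have hm : (pvDowns a)[j]'(by rw [length_pvDowns]; exact hj) ∈ pvDowns a := List.getElem_mem _
  unfold pvDowns at hm
  rw [List.mem_reverse] at hm
  exact pvUps_pos a.reverse _ hm

lemma pvUps_getD_zero (a : List Int) (h : 0 < a.length) : (pvUps a).getD 0 0 = 1 := by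
  cases a with
  | nil => simp at h
  | cons x t => simp [pvUps]

lemma pvUpsA_getD_succ (xs : List Int) : ∀ (p r : Int) (i : Nat), i + 1 < xs.length →
    (pvUpsA p r xs).getD (i + 1) 0 =
      if xs.getD i 0 < xs.getD (i + 1) 0 then (pvUpsA p r xs).getD i 0 + 1 else 1 := by
  induction xs with
  | nil => intro p r i h; simp at h
  | cons x t ih =>
    intro p r i h
    match i, t, h with
    | 0, y :: t', _ => simp [pvUpsA]
    | (j+1), t, h =>
      have h' : j + 1 < t.length := by simpa using h
      simp only [pvUpsA, List.getD_cons_succ]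
      exact ih x _ j h'

lemma pvUps_getD_succ (a : List Int) (i : Nat) (h : i + 1 < a.length) :
    (pvUps a).getD (i + 1) 0 =
      if a.getD i 0 < a.getD (i + 1) 0 then (pvUps a).getD i 0 + 1 else 1 := by
  cases a with
  | nil => simp at h
  | cons x t =>
    match i, t, h with
    | 0, y :: t', _ => simp [pvUps, pvUpsA]
    | (j+1), t, h =>
      have h' : j + 1 < t.length := by simpa using h
      simp only [pvUps, List.getD_cons_succ]
      exact pvUpsA_getD_succ t x 1 j h'

lemma getD_reverse (l : List Int) (i : Nat) (h : i < l.length) :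
    l.reverse.getD i 0 = l.getD (l.length - 1 - i) 0 := by
  rw [List.getD_eq_getElem _ _ (by simpa using h), List.getD_eq_getElem _ _ (by omega),
    List.getElem_reverse]

lemma pvDowns_getD_last (a : List Int) (h : 0 < a.length) :
    (pvDowns a).getD (a.length - 1) 0 = 1 := by
  have hlen : (pvUps a.reverse).length = a.length := by simp [length_pvUps]
  have e1 : (pvDowns a).getD (a.length - 1) 0 = (pvUps a.reverse).getD 0 0 := by
    unfold pvDowns
    rw [getD_reverse _ _ (by rw [hlen]; omega), hlen]
    congr 1; omega
  rw [e1]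
  exact pvUps_getD_zero a.reverse (by simpa using h)

lemma pvDowns_getD (a : List Int) (i : Nat) (h : i + 1 < a.length) :
    (pvDowns a).getD i 0 =
      if a.getD (i + 1) 0 < a.getD i 0 then (pvDowns a).getD (i + 1) 0 + 1 else 1 := by
  have hlen : (pvUps a.reverse).length = a.length := by simp [length_pvUps]
  have e1 : (pvDowns a).getD i 0 = (pvUps a.reverse).getD (a.length - 1 - i) 0 := by
    unfold pvDowns
    rw [getD_reverse _ _ (by rw [hlen]; omega), hlen]
  have e2 : (pvDowns a).getD (i + 1) 0 = (pvUps a.reverse).getD (a.length - 2 - i) 0 := by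
    unfold pvDowns
    rw [getD_reverse _ _ (by rw [hlen]; omega), hlen]
    congr 1; omega
  have e3 : a.reverse.getD (a.length - 2 - i) 0 = a.getD (i + 1) 0 := by
    rw [getD_reverse _ _ (by omega)]
    congr 1; omega
  have e4 : a.reverse.getD (a.length - 1 - i) 0 = a.getD i 0 := by
    rw [getD_reverse _ _ (by omega)]
    congr 1; omega
  have key := pvUps_getD_succ a.reverse (a.length - 2 - i)
    (by simp only [List.length_reverse]; omega)
  rw [show a.length - 2 - i + 1 = a.length - 1 - i from by omega] at key
  rw [e1, key, e3, e4, ← e2]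

lemma pvM_getD (a : List Int) (i : Nat) (h : i < a.length) :
    (pvM a).getD i 0 = max ((pvUps a).getD i 0) ((pvDowns a).getD i 0) := by
  rw [List.getD_eq_getElem _ _ (by rw [length_pvM]; exact h)]
  unfold pvM
  rw [List.getElem_zipWith]
  rw [List.getD_eq_getElem _ _ (by rw [length_pvUps]; exact h),
    List.getD_eq_getElem _ _ (by rw [length_pvDowns]; exact h)]

lemma getD_take_eq (arr : List Int) (n j : Nat) (hj : j < n) (hn : n ≤ arr.length) :
    (arr.take n).getD j 0 = arr.getD j 0 := by
  rw [List.getD_eq_getElem _ _ (by simp [List.length_take]; omega),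
    List.getD_eq_getElem _ _ (by omega)]
  simp [List.getElem_take]

lemma getD_set (l : List Int) (i j : Nat) (v : Int) (hj : j < l.length) :
    (l.set i v).getD j 0 = if i = j then v else l.getD j 0 := by
  rw [List.getD_eq_getElem _ _ (by simpa using hj), List.getD_eq_getElem _ _ hj,
    List.getElem_set]

-- A's first pass computes pvUps (invariant: prefix below k already equals pvUps, rest still 1)
lemma pass1_inv (arr : List Int) (n : Nat) (hn : n ≤ arr.length) :
    ∀ (m k : Nat) (B : List Int), k + m = n → 1 ≤ k → B.length = n →
      (∀ j : Nat, j < k → B.getD j 0 = (pvUps (arr.take n)).getD j 0) →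
      (∀ j : Nat, k ≤ j → j < n → B.getD j 0 = 1) →
      (PySem.List.pyRange (k : Int) (n : Int) 1).foldl (pvStep1 arr) B = pvUps (arr.take n) := by
  have ha : (arr.take n).length = n := by rw [List.length_take]; omega
  intro m
  induction m with
  | zero =>
    intro k B hkm hk1 hBlen hpre hsuf
    have hkn : k = n := by omega
    subst hkn
    rw [PySem.List.pyRange_one_eq_nil (by omega), List.foldl_nil]
    apply List.ext_getElem (by rw [hBlen, length_pvUps, ha])
    intro j h1 h2
    have := hpre j (by rwa [hBlen] at h1)
    rwa [List.getD_eq_getElem _ _ h1, List.getD_eq_getElem _ _ h2] at this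
  | succ m' ih =>
    intro k B hkm hk1 hBlen hpre hsuf
    have hkn : k < n := by omega
    have hkn' : k < arr.length := by omega
    rw [PySem.List.pyRange_one_cons (by exact_mod_cast hkn), List.foldl_cons]
    have hstep : pvStep1 arr B (k : Int) =
        if arr.getD (k - 1) 0 < arr.getD k 0 then
          B.set k ((pvUps (arr.take n)).getD (k - 1) 0 + 1)
        else B := by
      unfold pvStep1
      rw [show ((k : Int) - 1) = ((k - 1 : Nat) : Int) from by omega]
      simp only [PySem.List.pyGetD_natCast, PySem.List.pySetD_natCast, gt_iff_lt]
      rw [hpre (k - 1) (by omega)]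
    rw [show ((k : Int) + 1) = ((k + 1 : Nat) : Int) from by push_cast; ring]
    by_cases hc : arr.getD (k - 1) 0 < arr.getD k 0
    · rw [hstep, if_pos hc]
      apply ih (k + 1) _ (by omega) (by omega) (by rw [List.length_set]; exact hBlen)
      · intro j hj
        rcases Nat.lt_or_ge j k with hjk | hjk
        · rw [getD_set _ _ _ _ (by omega), if_neg (by omega)]
          exact hpre j hjk
        · have hjk : j = k := by omega
          subst hjk
          rw [getD_set _ _ _ _ (by omega), if_pos rfl]
          have hup := pvUps_getD_succ (arr.take n) (j - 1) (by omega)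
          rw [show j - 1 + 1 = j from by omega,
            getD_take_eq arr n (j - 1) (by omega) hn, getD_take_eq arr n j (by omega) hn] at hup
          rw [hup, if_pos hc]
      · intro j hj1 hj2
        rw [getD_set _ _ _ _ (by omega), if_neg (by omega)]
        exact hsuf j (by omega) hj2
    · rw [hstep, if_neg hc]
      apply ih (k + 1) B (by omega) (by omega) hBlen
      · intro j hj
        rcases Nat.lt_or_ge j k with hjk | hjk
        · exact hpre j hjk
        · have hjk : j = k := by omega
          subst hjk
          have hup := pvUps_getD_succ (arr.take n) (j - 1) (by omega)
          rw [show j - 1 + 1 = j from by omega,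
            getD_take_eq arr n (j - 1) (by omega) hn, getD_take_eq arr n j (by omega) hn] at hup
          rw [hup, if_neg hc]
          exact hsuf j (by omega) (by omega)
      · intro j hj1 hj2
        exact hsuf j (by omega) hj2

-- A's second pass turns pvUps into pvM (invariant: suffix above the cursor is final)
lemma pass2_inv (arr : List Int) (n : Nat) (hn : n ≤ arr.length) :
    ∀ (m : Nat) (B : List Int), m + 1 ≤ n → B.length = n →
      (∀ j : Nat, j < m → B.getD j 0 = (pvUps (arr.take n)).getD j 0) →
      (∀ j : Nat, m ≤ j → j < n → B.getD j 0 = (pvM (arr.take n)).getD j 0) →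
      (PySem.List.pyRange ((m : Int) - 1) (-1) (-1)).foldl (pvStep2 arr) B = pvM (arr.take n) := by
  have ha : (arr.take n).length = n := by rw [List.length_take]; omega
  intro m
  induction m with
  | zero =>
    intro B hm hBlen hpre hsuf
    rw [show ((0 : Nat) : Int) - 1 = (-1 : Int) from by norm_num]
    rw [PySem.List.pyRange_neg_one_eq_nil (by omega), List.foldl_nil]
    apply List.ext_getElem (by rw [hBlen, length_pvM, ha])
    intro j h1 h2
    have := hsuf j (by omega) (by rwa [hBlen] at h1)
    rwa [List.getD_eq_getElem _ _ h1, List.getD_eq_getElem _ _ h2] at this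
  | succ k ih =>
    intro B hm hBlen hpre hsuf
    have hk1n : k + 1 < n := by omega
    rw [show ((k + 1 : Nat) : Int) - 1 = (k : Int) from by push_cast; ring]
    rw [PySem.List.pyRange_neg_one_cons (by omega), List.foldl_cons]
    have hstep : pvStep2 arr B (k : Int) =
        if arr.getD (k + 1) 0 < arr.getD k 0 ∧
            (pvUps (arr.take n)).getD k 0 ≤ (pvM (arr.take n)).getD (k + 1) 0 then
          B.set k ((pvM (arr.take n)).getD (k + 1) 0 + 1)
        else B := by
      unfold pvStep2
      rw [show ((k : Int) + 1) = ((k + 1 : Nat) : Int) from by push_cast; ring]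
      simp only [PySem.List.pyGetD_natCast, PySem.List.pySetD_natCast, gt_iff_lt]
      rw [hpre k (by omega), hsuf (k + 1) (by omega) (by omega)]
    have hak : (arr.take n).getD k 0 = arr.getD k 0 := getD_take_eq arr n k (by omega) hn
    have hak1 : (arr.take n).getD (k + 1) 0 = arr.getD (k + 1) 0 :=
      getD_take_eq arr n (k + 1) (by omega) hn
    have hU1 := pvUps_getD_succ (arr.take n) k (by omega)
    have hD := pvDowns_getD (arr.take n) k (by omega)
    have hMk := pvM_getD (arr.take n) k (by omega)
    have hMk1 := pvM_getD (arr.take n) (k + 1) (by omega)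
    have hDpos := pvDowns_getD_pos (arr.take n) (k + 1) (by omega)
    have hUpos := pvUps_getD_pos (arr.take n) k (by omega)
    rw [hak, hak1] at hU1 hD
    by_cases hc : arr.getD (k + 1) 0 < arr.getD k 0
    · rw [if_neg (by omega)] at hU1
      rw [if_pos hc] at hD
      have hM1 : (pvM (arr.take n)).getD (k + 1) 0 = (pvDowns (arr.take n)).getD (k + 1) 0 := by
        rw [hMk1, hU1]; omega
      by_cases hc2 : (pvUps (arr.take n)).getD k 0 ≤ (pvM (arr.take n)).getD (k + 1) 0
      · rw [hstep, if_pos ⟨hc, hc2⟩]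
        apply ih _ (by omega) (by rw [List.length_set]; exact hBlen)
        · intro j hj
          rw [getD_set _ _ _ _ (by omega), if_neg (by omega)]
          exact hpre j (by omega)
        · intro j hj1 hj2
          rcases Nat.lt_or_ge j (k + 1) with hjk | hjk
          · have hjk : j = k := by omega
            subst hjk
            rw [getD_set _ _ _ _ (by omega), if_pos rfl, hM1, hMk, hD]
            rw [hM1] at hc2
            omega
          · rw [getD_set _ _ _ _ (by omega), if_neg (by omega)]
            exact hsuf j (by omega) hj2
      · rw [hstep, if_neg (by tauto)]
        apply ih _ (by omega) hBlen
        · intro j hj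
          exact hpre j (by omega)
        · intro j hj1 hj2
          rcases Nat.lt_or_ge j (k + 1) with hjk | hjk
          · have hjk : j = k := by omega
            subst hjk
            rw [hpre j (by omega), hMk, hD]
            rw [hM1] at hc2
            omega
          · exact hsuf j (by omega) hj2
    · rw [if_neg hc] at hD
      rw [hstep, if_neg (by tauto)]
      apply ih _ (by omega) hBlen
      · intro j hj
        exact hpre j (by omega)
      · intro j hj1 hj2
        rcases Nat.lt_or_ge j (k + 1) with hjk | hjk
        · have hjk : j = k := by omega
          subst hjk
          rw [hpre j (by omega), hMk, hD]
          omega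
        · exact hsuf j (by omega) hj2

-- ========== B-side lemmas ==========

lemma getD_append_lt (l l' : List Int) (j : Nat) (h : j < l.length) :
    (l ++ l').getD j 0 = l.getD j 0 := List.getD_append l l' 0 j h

lemma getD_concat_last (l : List Int) (x : Int) : (l ++ [x]).getD l.length 0 = x := by
  simp [List.getD_eq_getElem]

lemma getD_concat_last' (l : List Int) (x : Int) (n : Nat) (h : n = l.length) :
    (l ++ [x]).getD n 0 = x := by
  subst h; exact getD_concat_last l x

lemma take_succ_getD (l : List Int) (k : Nat) (h : k < l.length) :
    l.take (k + 1) = l.take k ++ [l.getD k 0] := by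
  rw [List.take_add_one]
  simp [List.getElem?_eq_getElem h]

-- appending one element to pvUps
lemma pvUpsA_append (xs : List Int) : ∀ (q r x : Int),
    pvUpsA q r (xs ++ [x]) =
      pvUpsA q r xs ++
        [if (q :: xs).getD xs.length 0 < x then (r :: pvUpsA q r xs).getD xs.length 0 + 1 else 1] := by
  induction xs with
  | nil => intro q r x; simp [pvUpsA]
  | cons y t ih =>
    intro q r x
    simp only [List.cons_append, pvUpsA, List.getD_cons_succ, List.length_cons]
    rw [ih]

lemma pvUps_append (p : List Int) (x : Int) (hp : p ≠ []) :
    pvUps (p ++ [x]) =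
      pvUps p ++
        [if p.getD (p.length - 1) 0 < x then (pvUps p).getD (p.length - 1) 0 + 1 else 1] := by
  cases p with
  | nil => exact absurd rfl hp
  | cons y t =>
    simp only [List.cons_append, pvUps, List.length_cons, Nat.add_sub_cancel]
    rw [pvUpsA_append]

-- pvDowns values propagate downward unchanged below an index where they agree
lemma pvDowns_eq_below (p : List Int) (x : Int) :
    ∀ (dlt m : Nat), m < p.length →
      (pvDowns (p ++ [x])).getD m 0 = (pvDowns p).getD m 0 →
      ∀ j : Nat, j + dlt = m → (pvDowns (p ++ [x])).getD j 0 = (pvDowns p).getD j 0 := by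
  intro dlt
  induction dlt with
  | zero =>
    intro m hm hb j hj
    have : j = m := by omega
    subst this; exact hb
  | succ t ih =>
    intro m hm hb j hj
    have e1 := ih m hm hb (j + 1) (by omega)
    have hjlt : j + 1 < p.length := by omega
    rw [pvDowns_getD p j hjlt, pvDowns_getD (p ++ [x]) j (by simp; omega)]
    rw [getD_append_lt p [x] (j + 1) hjlt, getD_append_lt p [x] j (by omega), e1]

-- when the new element does not extend a decreasing run, pvDowns is unchanged on old indices
lemma pvDowns_pres (p : List Int) (x : Int) (hp : 0 < p.length)
    (hx : ¬ x < p.getD (p.length - 1) 0) :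
    ∀ j : Nat, j < p.length → (pvDowns (p ++ [x])).getD j 0 = (pvDowns p).getD j 0 := by
  have hbase : (pvDowns (p ++ [x])).getD (p.length - 1) 0 = (pvDowns p).getD (p.length - 1) 0 := by
    rw [pvDowns_getD (p ++ [x]) (p.length - 1) (by simp; omega)]
    rw [show p.length - 1 + 1 = p.length from by omega]
    rw [getD_concat_last, getD_append_lt _ _ _ (by omega), if_neg hx,
      pvDowns_getD_last p hp]
  intro j hj
  exact pvDowns_eq_below p x (p.length - 1 - j) (p.length - 1) (by omega) hbase j (by omega)

-- on a strictly decreasing suffix, pvDowns p j = p.length - j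
lemma pvDowns_run_val (p : List Int) (d : Nat) (hd : d + 1 ≤ p.length)
    (hrun : ∀ j : Nat, p.length - 1 - d ≤ j → j + 1 < p.length →
      p.getD (j + 1) 0 < p.getD j 0) :
    ∀ (t j : Nat), j + t = p.length - 1 → p.length - 1 - d ≤ j →
      (pvDowns p).getD j 0 = ((p.length - j : Nat) : Int) := by
  intro t
  induction t with
  | zero =>
    intro j hj _
    have : j = p.length - 1 := by omega
    subst this
    rw [pvDowns_getD_last p (by omega)]
    have : p.length - (p.length - 1) = 1 := by omega
    rw [this]; rfl
  | succ t ih =>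
    intro j hj hjr
    have hjlt : j + 1 < p.length := by omega
    rw [pvDowns_getD p j hjlt, if_pos (hrun j hjr hjlt), ih (j + 1) (by omega) (by omega)]
    have : (p.length - j : Nat) = (p.length - (j + 1) : Nat) + 1 := by omega
    rw [this]; push_cast; ring

-- extending a strictly decreasing suffix: pvDowns increases by one along the run
lemma pvDowns_ext_run (p : List Int) (x : Int) (d : Nat) (hd : d + 1 ≤ p.length)
    (hrun : ∀ j : Nat, p.length - 1 - d ≤ j → j + 1 < p.length →
      p.getD (j + 1) 0 < p.getD j 0)
    (hx : x < p.getD (p.length - 1) 0) :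
    ∀ (t j : Nat), j + t = p.length - 1 → p.length - 1 - d ≤ j →
      (pvDowns (p ++ [x])).getD j 0 = (pvDowns p).getD j 0 + 1 := by
  intro t
  induction t with
  | zero =>
    intro j hj _
    have : j = p.length - 1 := by omega
    subst this
    rw [pvDowns_getD (p ++ [x]) (p.length - 1) (by simp; omega)]
    rw [show p.length - 1 + 1 = p.length from by omega]
    rw [getD_concat_last, getD_append_lt _ _ _ (by omega), if_pos hx]
    have hlast' : (pvDowns (p ++ [x])).getD p.length 0 = 1 := by
      have := pvDowns_getD_last (p ++ [x]) (by simp)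
      simpa using this
    rw [hlast', pvDowns_getD_last p (by omega)]
  | succ t ih =>
    intro j hj hjr
    have hjlt : j + 1 < p.length := by omega
    rw [pvDowns_getD p j hjlt, pvDowns_getD (p ++ [x]) j (by simp; omega)]
    rw [getD_append_lt p [x] (j + 1) hjlt, getD_append_lt p [x] j (by omega)]
    rw [if_pos (hrun j hjr hjlt), if_pos (hrun j hjr hjlt), ih (j + 1) (by omega) (by omega)]

lemma sum_getD_range : ∀ (l : List Int), l.sum = ∑ j ∈ Finset.range l.length, l.getD j 0 := by
  intro l
  induction l with
  | nil => simp
  | cons a t ih =>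
    rw [List.sum_cons, List.length_cons, Finset.sum_range_succ' (fun j => (a :: t).getD j 0)]
    simp only [List.getD_cons_succ, List.getD_cons_zero]
    rw [← ih]; ring

lemma sum_delta_aux (s : Nat) (c0 : Int) :
    ∀ n : Nat, s + 1 ≤ n →
      (∑ j ∈ Finset.range n, (if j < s then (0 : Int) else if j = s then c0 else 1)) =
        c0 + ((n - s - 1 : Nat) : Int) := by
  intro n hn
  induction n, hn using Nat.le_induction with
  | base =>
    rw [Finset.sum_range_succ]
    rw [Finset.sum_eq_zero (by intro j hj; rw [if_pos (Finset.mem_range.mp hj)])]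
    simp
  | succ n hn ih =>
    rw [Finset.sum_range_succ, ih, if_neg (by omega), if_neg (by omega)]
    have : (n + 1 - s - 1 : Nat) = (n - s - 1 : Nat) + 1 := by omega
    rw [this]; push_cast; ring

lemma sum_delta (l l' : List Int) (s : Nat) (c0 : Int)
    (hlen : l'.length = l.length) (hs : s < l.length)
    (h1 : ∀ j : Nat, j < s → l'.getD j 0 = l.getD j 0)
    (h2 : l'.getD s 0 = l.getD s 0 + c0)
    (h3 : ∀ j : Nat, s < j → j < l.length → l'.getD j 0 = l.getD j 0 + 1) :
    l'.sum = l.sum + c0 + ((l.length - s - 1 : Nat) : Int) := by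
  rw [sum_getD_range l', sum_getD_range l, hlen]
  have hcong : ∀ j ∈ Finset.range l.length,
      l'.getD j 0 = l.getD j 0 + (if j < s then (0 : Int) else if j = s then c0 else 1) := by
    intro j hj
    rcases Nat.lt_trichotomy j s with h | h | h
    · rw [if_pos h, h1 j h]; ring
    · subst h; rw [if_neg (by omega), if_pos rfl, h2]
    · rw [if_neg (by omega), if_neg (by omega), h3 j h (Finset.mem_range.mp hj)]
  rw [Finset.sum_congr rfl hcong, Finset.sum_add_distrib,
    sum_delta_aux s c0 l.length (by omega)]
  ring

lemma list_eq_take_concat (l : List Int) (n : Nat) (h : l.length = n + 1) :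
    l = l.take n ++ [l.getD n 0] := by
  conv_lhs => rw [← List.take_append_drop n l]
  congr 1
  have hlen : (l.drop n).length = 1 := by rw [List.length_drop]; omega
  have : l.drop n = [(l.drop n).getD 0 0] := by
    cases hq : l.drop n with
    | nil => rw [hq] at hlen; simp at hlen
    | cons a t =>
      rw [hq] at hlen
      simp at hlen
      simp [hlen]
  rw [this]
  congr 1
  rw [List.getD_eq_getElem _ _ (by omega), List.getD_eq_getElem _ _ (by omega)]
  simp [List.getElem_drop]

-- when pvUps gets [v] appended and pvDowns is unchanged on old indices, pvM gets [v] appended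
lemma pvM_concat (p : List Int) (x v : Int) (hp : 0 < p.length)
    (hu : pvUps (p ++ [x]) = pvUps p ++ [v]) (hv : 1 ≤ v)
    (hdeq : ∀ j : Nat, j < p.length → (pvDowns (p ++ [x])).getD j 0 = (pvDowns p).getD j 0) :
    pvM (p ++ [x]) = pvM p ++ [v] := by
  apply List.ext_getElem (by simp [length_pvM])
  intro j h1 h2
  rw [← List.getD_eq_getElem _ 0 h1, ← List.getD_eq_getElem _ 0 h2]
  have hj1 : j < p.length + 1 := by
    have := h1; rw [length_pvM] at this; simpa using this
  rcases Nat.lt_or_ge j p.length with hj | hj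
  · rw [pvM_getD (p ++ [x]) j (by simp; omega), hu,
      getD_append_lt (pvUps p) [v] j (by rw [length_pvUps]; omega), hdeq j hj,
      getD_append_lt (pvM p) [v] j (by rw [length_pvM]; omega), pvM_getD p j hj]
  · have hj' : j = p.length := by omega
    subst hj'
    rw [pvM_getD (p ++ [x]) p.length (by simp)]
    rw [hu, getD_concat_last' (pvUps p) v p.length (length_pvUps p).symm]
    have hdl : (pvDowns (p ++ [x])).getD p.length 0 = 1 := by
      have := pvDowns_getD_last (p ++ [x]) (by simp)
      simpa using this
    rw [hdl, getD_concat_last' (pvM p) v p.length (length_pvM p).symm]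
    omega

-- from the invariant: the last pvUps value of the prefix is u + 1
lemma inv_ups_last (P : List Int) (d pk u : Nat) (hlen : 0 < P.length) (hd : d + 1 ≤ P.length)
    (h5 : (pvUps P).getD (P.length - 1 - d) 0 = (pk : Int) + 1)
    (h6 : ∀ j : Nat, P.length - 1 - d < j → j < P.length → (pvUps P).getD j 0 = 1)
    (h7 : u = if d = 0 then pk else 0) :
    (pvUps P).getD (P.length - 1) 0 = (u : Int) + 1 := by
  by_cases hd0 : d = 0
  · subst hd0
    rw [show (if (0 : Nat) = 0 then pk else 0) = pk from rfl] at h7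
    subst h7
    simpa using h5
  · rw [h6 (P.length - 1) (by omega) (by omega), h7, if_neg hd0]
    simp

-- the main loop invariant for B's single forward pass
lemma foldB_inv (arr : List Int) (n : Nat) (hn : n ≤ arr.length) :
    ∀ (m k : Nat), k + m = n → 1 ≤ k →
    ∀ (u d pk : Nat) (total : Int),
      total = (pvM (arr.take k)).sum →
      d + 1 ≤ k →
      (∀ j : Nat, k - 1 - d ≤ j → j + 1 < k → arr.getD (j + 1) 0 < arr.getD j 0) →
      (d + 1 < k → ¬ arr.getD (k - 1 - d) 0 < arr.getD (k - 2 - d) 0) →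
      (pvUps (arr.take k)).getD (k - 1 - d) 0 = (pk : Int) + 1 →
      (∀ j : Nat, k - 1 - d < j → j < k → (pvUps (arr.take k)).getD j 0 = 1) →
      u = (if d = 0 then pk else 0) →
      ((PySem.List.pyRange (k : Int) (n : Int) 1).foldl (pvStepB arr)
          ((u : Int), (d : Int), (pk : Int), total)).2.2.2 = (pvM (arr.take n)).sum := by
  intro m
  induction m with
  | zero =>
    intro k hkm hk1 u d pk total h1 h2 h3 h4 h5 h6 h7
    have hkn : k = n := by omega
    subst hkn
    rw [PySem.List.pyRange_one_eq_nil (by omega), List.foldl_nil]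
    exact h1
  | succ m' ih =>
    intro k hkm hk1 u d pk total h1 h2 h3 h4 h5 h6 h7
    have hkn : k < n := by omega
    have hkn' : k < arr.length := by omega
    rw [PySem.List.pyRange_one_cons (by exact_mod_cast hkn), List.foldl_cons]
    -- abbreviations for the prefix and the two compared entries
    have hPlen : (arr.take k).length = k := by rw [List.length_take]; omega
    have hPlen1 : (arr.take (k + 1)).length = k + 1 := by rw [List.length_take]; omega
    have htk : arr.take (k + 1) = arr.take k ++ [arr.getD k 0] := take_succ_getD arr k hkn'
    have hlastP : (arr.take k).getD (k - 1) 0 = arr.getD (k - 1) 0 :=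
      getD_take_eq arr k (k - 1) (by omega) (by omega)
    have hPne : arr.take k ≠ [] := by
      intro h; rw [h] at hPlen; simp at hPlen; omega
    have hupsLast : (pvUps (arr.take k)).getD (k - 1) 0 = (u : Int) + 1 := by
      have := inv_ups_last (arr.take k) d pk u (by omega) (by omega)
        (by rwa [hPlen]) (by rw [hPlen]; exact h6) h7
      rwa [hPlen] at this
    have hstep : pvStepB arr ((u : Int), (d : Int), (pk : Int), total) (k : Int) =
        if arr.getD (k - 1) 0 < arr.getD k 0 then
          ((u : Int) + 1, 0, (u : Int) + 1, total + 1 + ((u : Int) + 1))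
        else if arr.getD k 0 = arr.getD (k - 1) 0 then
          (0, 0, 0, total + 1)
        else
          (0, (d : Int) + 1, (pk : Int),
            total + 1 + ((d : Int) + 1) - (if (pk : Int) ≥ (d : Int) + 1 then 1 else 0)) := by
      unfold pvStepB
      rw [show ((k : Int) - 1) = ((k - 1 : Nat) : Int) from by omega]
      simp only [PySem.List.pyGetD_natCast, gt_iff_lt]
    rw [hstep]
    rw [show ((k : Int) + 1) = ((k + 1 : Nat) : Int) from by push_cast; ring]
    -- the appended pvUps value for the prefix of length k + 1
    have hupsApp : pvUps (arr.take (k + 1)) =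
        pvUps (arr.take k) ++
          [if arr.getD (k - 1) 0 < arr.getD k 0 then (u : Int) + 2 else 1] := by
      rw [htk, pvUps_append (arr.take k) (arr.getD k 0) hPne, hPlen, hlastP, hupsLast]
      by_cases hc : arr.getD (k - 1) 0 < arr.getD k 0
      · rw [if_pos hc, if_pos hc]; ring_nf
      · rw [if_neg hc, if_neg hc]
    by_cases hc1 : arr.getD (k - 1) 0 < arr.getD k 0
    · -- increasing step
      rw [if_pos hc1]
      have hdeq : ∀ j : Nat, j < k →
          (pvDowns (arr.take (k + 1))).getD j 0 = (pvDowns (arr.take k)).getD j 0 := by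
        intro j hj
        rw [htk]
        refine pvDowns_pres (arr.take k) (arr.getD k 0) (by omega) ?_ j (by omega)
        rw [hPlen, hlastP]; omega
      have hM : pvM (arr.take (k + 1)) = pvM (arr.take k) ++ [(u : Int) + 2] := by
        rw [htk]
        apply pvM_concat (arr.take k) (arr.getD k 0) ((u : Int) + 2) (by omega)
        · rw [← htk, hupsApp, if_pos hc1]
        · omega
        · intro j hj
          rw [← htk]
          exact hdeq j (by omega)
      rw [show ((u : Int) + 1, (0 : Int), (u : Int) + 1, total + 1 + ((u : Int) + 1)) =
          (((u + 1 : Nat) : Int), ((0 : Nat) : Int), ((u + 1 : Nat) : Int),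
            total + 1 + ((u : Int) + 1)) from by push_cast; rfl]
      apply ih (k + 1) (by omega) (by omega)
      · rw [hM, List.sum_append, h1]; simp; ring
      · omega
      · intro j hj1 hj2; omega
      · intro _
        rw [show k + 1 - 1 - 0 = k from by omega, show k + 1 - 2 - 0 = k - 1 from by omega]
        omega
      · rw [show k + 1 - 1 - 0 = k from by omega, hupsApp,
          getD_concat_last' _ _ k (by rw [length_pvUps, hPlen]), if_pos hc1]
        push_cast; ring
      · intro j hj1 hj2; omega
      · simp
    · rw [if_neg hc1]
      by_cases hc2 : arr.getD k 0 = arr.getD (k - 1) 0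
      · -- equal step
        rw [if_pos hc2]
        have hdeq : ∀ j : Nat, j < k →
            (pvDowns (arr.take (k + 1))).getD j 0 = (pvDowns (arr.take k)).getD j 0 := by
          intro j hj
          rw [htk]
          refine pvDowns_pres (arr.take k) (arr.getD k 0) (by omega) ?_ j (by omega)
          rw [hPlen, hlastP]; omega
        have hM : pvM (arr.take (k + 1)) = pvM (arr.take k) ++ [(1 : Int)] := by
          rw [htk]
          apply pvM_concat (arr.take k) (arr.getD k 0) 1 (by omega)
          · rw [← htk, hupsApp, if_neg hc1]
          · omega
          · intro j hj
            rw [← htk]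
            exact hdeq j (by omega)
        rw [show ((0 : Int), (0 : Int), (0 : Int), total + 1) =
            (((0 : Nat) : Int), ((0 : Nat) : Int), ((0 : Nat) : Int), total + 1) from by
          push_cast; rfl]
        apply ih (k + 1) (by omega) (by omega)
        · rw [hM, List.sum_append, h1]; simp
        · omega
        · intro j hj1 hj2; omega
        · intro _
          rw [show k + 1 - 1 - 0 = k from by omega, show k + 1 - 2 - 0 = k - 1 from by omega]
          omega
        · rw [show k + 1 - 1 - 0 = k from by omega, hupsApp,
            getD_concat_last' _ _ k (by rw [length_pvUps, hPlen]), if_neg hc1]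
          rfl
        · intro j hj1 hj2; omega
        · simp
      · -- decreasing step
        rw [if_neg hc2]
        have hcd : arr.getD k 0 < arr.getD (k - 1) 0 := by omega
        set s := k - 1 - d with hs
        -- run facts transported to the prefix arr.take k
        have hrunP : ∀ j : Nat, (arr.take k).length - 1 - d ≤ j → j + 1 < (arr.take k).length →
            (arr.take k).getD (j + 1) 0 < (arr.take k).getD j 0 := by
          intro j hj1 hj2
          rw [hPlen] at hj1 hj2
          rw [getD_take_eq arr k (j + 1) (by omega) (by omega),
            getD_take_eq arr k j (by omega) (by omega)]
          exact h3 j hj1 hj2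
        have hxP : arr.getD k 0 < (arr.take k).getD ((arr.take k).length - 1) 0 := by
          rw [hPlen, hlastP]; exact hcd
        -- pvDowns values of the old prefix on the run
        have hrv : ∀ j : Nat, s ≤ j → j < k →
            (pvDowns (arr.take k)).getD j 0 = ((k - j : Nat) : Int) := by
          intro j hj1 hj2
          have := pvDowns_run_val (arr.take k) d (by omega) hrunP (k - 1 - j) j
            (by omega) (by rw [hPlen]; omega)
          rwa [hPlen] at this
        -- pvDowns on the extended prefix: +1 on the run, unchanged below it
        have hdrun : ∀ j : Nat, s ≤ j → j < k →
            (pvDowns (arr.take (k + 1))).getD j 0 = (pvDowns (arr.take k)).getD j 0 + 1 := by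
          intro j hj1 hj2
          rw [htk]
          have := pvDowns_ext_run (arr.take k) (arr.getD k 0) d (by omega) hrunP hxP
            (k - 1 - j) j (by rw [hPlen]; omega) (by rw [hPlen]; omega)
          exact this
        have hdlow : ∀ j : Nat, j < s →
            (pvDowns (arr.take (k + 1))).getD j 0 = (pvDowns (arr.take k)).getD j 0 := by
          intro j hj
          have hdk : d + 1 < k := by omega
          have hbase : (pvDowns (arr.take (k + 1))).getD (s - 1) 0 =
              (pvDowns (arr.take k)).getD (s - 1) 0 := by
            have hnd : ¬ (arr.take k).getD (s - 1 + 1) 0 < (arr.take k).getD (s - 1) 0 := by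
              rw [getD_take_eq arr k (s - 1 + 1) (by omega) (by omega),
                getD_take_eq arr k (s - 1) (by omega) (by omega),
                show s - 1 + 1 = k - 1 - d from by omega,
                show s - 1 = k - 2 - d from by omega]
              exact h4 hdk
            rw [htk, pvDowns_getD (arr.take k ++ [arr.getD k 0]) (s - 1) (by simp; omega),
              pvDowns_getD (arr.take k) (s - 1) (by rw [hPlen]; omega)]
            rw [getD_append_lt (arr.take k) [arr.getD k 0] (s - 1 + 1) (by rw [hPlen]; omega),
              getD_append_lt (arr.take k) [arr.getD k 0] (s - 1) (by rw [hPlen]; omega)]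
            rw [if_neg hnd, if_neg hnd]
          rw [htk]
          exact pvDowns_eq_below (arr.take k) (arr.getD k 0) (s - 1 - j) (s - 1)
            (by omega) (by rw [← htk]; exact hbase) j (by omega)
        -- the correction term
        set c0 : Int := if (pk : Int) ≥ (d : Int) + 1 then 0 else 1 with hc0
        -- pvM (take (k+1)) = (its first k entries) ++ [1]
        have hMlast : (pvM (arr.take (k + 1))).getD k 0 = 1 := by
          rw [pvM_getD (arr.take (k + 1)) k (by omega), hupsApp,
            getD_concat_last' _ _ k (by rw [length_pvUps, hPlen]), if_neg hc1]
          have : (pvDowns (arr.take (k + 1))).getD k 0 = 1 := by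
            have := pvDowns_getD_last (arr.take (k + 1)) (by omega)
            rwa [hPlen1, Nat.add_sub_cancel] at this
          rw [this]
          simp
        have hMsplit : pvM (arr.take (k + 1)) =
            (pvM (arr.take (k + 1))).take k ++ [(1 : Int)] := by
          have := list_eq_take_concat (pvM (arr.take (k + 1))) k
            (by rw [length_pvM, hPlen1])
          rwa [hMlast] at this
        -- pointwise relation of the first k entries with pvM (take k)
        have hTlen : ((pvM (arr.take (k + 1))).take k).length = k := by
          rw [List.length_take, length_pvM, hPlen1]; omega
        have hTget : ∀ j : Nat, j < k →
            ((pvM (arr.take (k + 1))).take k).getD j 0 = (pvM (arr.take (k + 1))).getD j 0 := by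
          intro j hj
          exact getD_take_eq _ k j hj (by rw [length_pvM, hPlen1]; omega)
        have hupsSame : ∀ j : Nat, j < k →
            (pvUps (arr.take (k + 1))).getD j 0 = (pvUps (arr.take k)).getD j 0 := by
          intro j hj
          rw [hupsApp, getD_append_lt _ _ _ (by rw [length_pvUps, hPlen]; omega)]
        have hsum : ((pvM (arr.take (k + 1))).take k).sum =
            (pvM (arr.take k)).sum + c0 + ((d : Nat) : Int) := by
          have hres := sum_delta (pvM (arr.take k)) ((pvM (arr.take (k + 1))).take k) s c0
            (by rw [hTlen, length_pvM, hPlen])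
            (by rw [length_pvM, hPlen]; omega)
            ?_ ?_ ?_
          · rw [hres, length_pvM, hPlen, show (k - s - 1 : Nat) = d from by omega]
          · intro j hj
            rw [hTget j (by omega), pvM_getD (arr.take (k + 1)) j (by omega),
              pvM_getD (arr.take k) j (by omega), hupsSame j (by omega), hdlow j hj]
          · rw [hTget s (by omega), pvM_getD (arr.take (k + 1)) s (by omega),
              pvM_getD (arr.take k) s (by omega), hupsSame s (by omega),
              hdrun s (by omega) (by omega), hrv s (by omega) (by omega)]
            have h5' : (pvUps (arr.take k)).getD s 0 = (pk : Int) + 1 := h5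
            rw [h5', show ((k - s : Nat) : Int) = (d : Int) + 1 from by
              rw [show (k - s : Nat) = d + 1 from by omega]; push_cast; ring]
            rw [hc0]
            by_cases hcc : (pk : Int) ≥ (d : Int) + 1
            · rw [if_pos hcc, max_eq_left (by omega), max_eq_left (by omega)]; ring
            · rw [if_neg hcc, max_eq_right (by omega), max_eq_right (by omega)]
          · intro j hj1 hj2
            rw [length_pvM, hPlen] at hj2
            rw [hTget j hj2, pvM_getD (arr.take (k + 1)) j (by omega),
              pvM_getD (arr.take k) j (by omega), hupsSame j hj2,
              hdrun j (by omega) hj2, hrv j (by omega) hj2]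
            have hu1 : (pvUps (arr.take k)).getD j 0 = 1 := h6 j (by omega) hj2
            rw [hu1, max_eq_right (by
                have : (1 : Int) ≤ ((k - j : Nat) : Int) := by
                  have : 1 ≤ k - j := by omega
                  exact_mod_cast this
                omega),
              max_eq_right (by
                have : (1 : Int) ≤ ((k - j : Nat) : Int) := by
                  have : 1 ≤ k - j := by omega
                  exact_mod_cast this
                omega)]
        have hsumFull : (pvM (arr.take (k + 1))).sum =
            (pvM (arr.take k)).sum + c0 + ((d : Nat) : Int) + 1 := by
          conv_lhs => rw [hMsplit]
          rw [List.sum_append, hsum]; simp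
        rw [show ((0 : Int), (d : Int) + 1, (pk : Int),
            total + 1 + ((d : Int) + 1) - (if (pk : Int) ≥ (d : Int) + 1 then 1 else 0)) =
            (((0 : Nat) : Int), ((d + 1 : Nat) : Int), ((pk : Nat) : Int),
              total + 1 + ((d : Int) + 1) - (if (pk : Int) ≥ (d : Int) + 1 then 1 else 0))
            from by push_cast; rfl]
        apply ih (k + 1) (by omega) (by omega)
        · rw [hsumFull, h1, hc0]
          by_cases hcc : (pk : Int) ≥ (d : Int) + 1
          · rw [if_pos hcc, if_pos hcc]; ring
          · rw [if_neg hcc, if_neg hcc]; ring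
        · omega
        · intro j hj1 hj2
          rcases Nat.lt_or_ge (j + 1) k with hjk | hjk
          · exact h3 j (by omega) hjk
          · have hje : j = k - 1 := by omega
            subst hje
            rw [show k - 1 + 1 = k from by omega]
            exact hcd
        · intro hdk
          rw [show k + 1 - 1 - (d + 1) = k - 1 - d from by omega,
            show k + 1 - 2 - (d + 1) = k - 2 - d from by omega]
          exact h4 (by omega)
        · rw [show k + 1 - 1 - (d + 1) = s from by omega, hupsSame s (by omega)]
          exact h5
        · intro j hj1 hj2
          rw [show k + 1 - 1 - (d + 1) = s from by omega] at hj1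
          rcases Nat.lt_or_ge j k with hjk | hjk
          · rw [hupsSame j hjk]
            exact h6 j (by omega) hjk
          · have hje : j = k := by omega
            rw [hje, hupsApp, getD_concat_last' _ _ k (by rw [length_pvUps, hPlen]), if_neg hc1]
        · simp

-- pvM of a one-element prefix
lemma pvM_single (a : Int) : pvM [a] = [1] := by
  simp [pvM, pvUps, pvDowns, pvUpsA]

-- ===== VERDICT (by name: the statement is the Claim_ definition above) =====
theorem min_balls_to_buy_spec : Claim_equal_min_balls_to_buy := by
  unfold Claim_equal_min_balls_to_buy
  intro N arr _ hpre
  unfold Spec_min_balls_to_buy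
  simp only [min_balls_to_buy, min_balls_to_buy_alt]
  by_cases hN : N ≤ 0
  · rw [if_pos hN]
    by_cases h0 : N = 0
    · rw [if_pos h0]
    · rw [if_neg h0]
      rw [PySem.List.pyRange_one_eq_nil (by omega), List.foldl_nil,
        PySem.List.pyRange_neg_one_eq_nil (by omega), List.foldl_nil]
      rw [show N.toNat = 0 from by omega]
      simp
  · rw [if_neg hN, if_neg (by omega : ¬N = 0)]
    by_cases h1 : N = 1
    · subst h1
      rw [PySem.List.pyRange_one_eq_nil (by omega : (1 : Int) ≤ 1)]
      rw [PySem.List.pyRange_neg_one_eq_nil (by omega : (1 : Int) - 2 ≤ -1)]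
      simp
    · have hNle : N ≤ (arr.length : Int) := by
        rcases hpre with h | h
        · exact h
        · omega
      set n := N.toNat with hn
      have hNn : N = (n : Int) := by omega
      have hnlen : n ≤ arr.length := by omega
      have hn1 : 1 ≤ n := by omega
      have ha : (arr.take n).length = n := by rw [List.length_take]; omega
      have hrep : ∀ j : Nat, j < n → (List.replicate n (1 : Int)).getD j 0 = 1 := by
        intro j hj
        rw [List.getD_eq_getElem _ _ (by simpa using hj), List.getElem_replicate]
      have p1 : (PySem.List.pyRange ((1 : Nat) : Int) ((n : Nat) : Int) 1).foldl (pvStep1 arr)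
          (List.replicate n (1 : Int)) = pvUps (arr.take n) := by
        apply pass1_inv arr n hnlen (n - 1) 1 _ (by omega) (by omega) (by simp)
        · intro j hj
          have hj0 : j = 0 := by omega
          subst hj0
          rw [pvUps_getD_zero _ (by omega), hrep 0 (by omega)]
        · intro j hj1 hj2
          exact hrep j hj2
      have p2 : (PySem.List.pyRange (((n - 1 : Nat) : Int) - 1) (-1) (-1)).foldl (pvStep2 arr)
          (pvUps (arr.take n)) = pvM (arr.take n) := by
        apply pass2_inv arr n hnlen (n - 1) _ (by omega) (by rw [length_pvUps, ha])
        · intro j hj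
          rfl
        · intro j hj1 hj2
          have hj : j = n - 1 := by omega
          subst hj
          have hD := pvDowns_getD_last (arr.take n) (by omega)
          rw [ha] at hD
          have hUpos := pvUps_getD_pos (arr.take n) (n - 1) (by omega)
          rw [pvM_getD _ _ (by omega), hD]
          omega
      -- B's one-pass fold equals the pvM sum
      have htake1 : arr.take 1 = [arr.getD 0 0] := by
        have := take_succ_getD arr 0 (by omega)
        simpa using this
      have pB : ((PySem.List.pyRange ((1 : Nat) : Int) ((n : Nat) : Int) 1).foldl (pvStepB arr)
          (((0 : Nat) : Int), ((0 : Nat) : Int), ((0 : Nat) : Int), 1)).2.2.2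
            = (pvM (arr.take n)).sum := by
        apply foldB_inv arr n hnlen (n - 1) 1 (by omega) (by omega)
        · rw [htake1, pvM_single]; simp
        · omega
        · intro j hj1 hj2; omega
        · intro h; omega
        · rw [htake1]
          simp [pvUps]
        · intro j hj1 hj2; omega
        · simp
      rw [hNn]
      push_cast at p1
      push_cast [Nat.cast_sub hn1] at p2
      rw [show ((n : Int) - 1 - 1) = (n : Int) - 2 from by ring] at p2
      rw [p1, p2]
      push_cast at pB
      rw [pB]
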